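-- pv_equiv track=rewrite | github.com/pri22296/apriori | apriori.py | get_classwise_count
-- ===== SOURCE A (Python) =====
-- def get_classwise_count(dataset, classes, items):
--     count_class = dict()
--     for key in set(classes):
--         count_class[key] = [0,0]
--     for i,data in enumerate(dataset):
--         found = True
--         for item in items:
--             if item not in data:
--                 found = False
--                 break
--             else:
--                 pass
--         if found:
--             count_class[classes[i]][0] += 1
--         count_class[classes[i]][1] += 1
--     return count_class
-- ===== SOURCE B (Python) =====
-- def get_classwise_count(dataset, classes, items):
--     # Grouping-then-counting decomposition: first bucket rows by class,
--     # then count per bucket. Same dict value for every class as A.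
--     groups = {}
--     for cls, row in zip(classes, dataset):
--         groups[cls] = groups.get(cls, []) + [row]
--     for cls in classes:
--         groups.setdefault(cls, [])
--     s = set(items)
--     return {cls: [sum(1 for r in rows if s.issubset(r)), len(rows)]
--             for cls, rows in groups.items()}
-- ===== Notes on version B (the rewrite author's own statement) =====
-- stated objective: alternative
-- what changed: A interleaves both counters in one indexed pass over dataset with an inner break loop; B first groups rows by class into a dict of row lists (zip pass plus a setdefault pass for classes beyond the dataset), then computes [found, total] per group by a subset-count and a length.
import Mathlib
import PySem

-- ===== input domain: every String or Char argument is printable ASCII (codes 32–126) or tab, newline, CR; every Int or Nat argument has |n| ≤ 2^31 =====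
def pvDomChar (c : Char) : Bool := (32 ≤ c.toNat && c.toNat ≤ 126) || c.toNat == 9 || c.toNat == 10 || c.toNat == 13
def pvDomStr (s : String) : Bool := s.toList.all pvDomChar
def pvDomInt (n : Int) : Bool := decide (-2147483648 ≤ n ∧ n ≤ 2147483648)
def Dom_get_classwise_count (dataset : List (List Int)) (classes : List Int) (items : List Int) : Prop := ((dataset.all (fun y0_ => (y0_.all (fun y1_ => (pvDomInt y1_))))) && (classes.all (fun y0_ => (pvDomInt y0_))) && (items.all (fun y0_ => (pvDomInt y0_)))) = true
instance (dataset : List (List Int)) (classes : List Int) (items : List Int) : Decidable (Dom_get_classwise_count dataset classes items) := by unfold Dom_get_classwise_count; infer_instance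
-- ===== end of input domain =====

-- B re-implements A by grouping rows per class first and counting per group afterwards,
-- instead of A's single interleaved indexed pass; same return value ("alternative" objective).

-- ===== PORT A =====
-- inner 'for item in items: if item not in data: found = False; break'
def pvAFound (items data : List Int) : Bool :=
  match items with
  | [] => true
  | it :: rest => if it ∈ data then pvAFound rest data else false

-- count_class[c][0] += 1  (list cell mutation; values here always have ≥ 2 elements)
def pvABump0 (v : List Int) : List Int :=
  match v with
  | a :: t => (a + 1) :: t
  | [] => []

-- count_class[c][1] += 1
def pvABump1 (v : List Int) : List Int :=
  match v with
  | a :: b :: t => a :: (b + 1) :: t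
  | v => v

-- loop body for one (i, data) of enumerate(dataset)
def pvAStep (classes items : List Int) (d : PySem.Dict Int (List Int)) (i : Nat)
    (data : List Int) : PySem.Dict Int (List Int) :=
  match PySem.List.pyGet? classes (i : Int) with
  | none => d  -- Python raises IndexError here; excluded by Pre_
  | some c =>
      let d1 := if pvAFound items data then d.modify c [0, 0] pvABump0 else d
      d1.modify c [0, 0] pvABump1

-- 'for i, data in enumerate(dataset):'
def pvALoop (classes items : List Int) (i : Nat) (d : PySem.Dict Int (List Int)) :
    List (List Int) → PySem.Dict Int (List Int)
  | [] => d
  | data :: rest => pvALoop classes items (i + 1) (pvAStep classes items d i data) rest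

def get_classwise_count (dataset : List (List Int)) (classes : List Int) (items : List Int) :
    List (Int × List Int) :=
  let d0 : PySem.Dict Int (List Int) :=
    (PySem.Set.ofList classes).foldl (fun d k => d.insert k [0, 0]) PySem.Dict.empty
  (pvALoop classes items 0 d0 dataset).items

-- ===== PORT B =====
-- s.issubset(r) for s = set(items)
def pvBSubset (items row : List Int) : Bool :=
  PySem.Set.issubset (PySem.Set.ofList items) row

def get_classwise_count_alt (dataset : List (List Int)) (classes : List Int) (items : List Int) :
    List (Int × List Int) :=
  -- groups[cls] = groups.get(cls, []) + [row]  over zip(classes, dataset)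
  let g1 : PySem.Dict Int (List (List Int)) :=
    (classes.zip dataset).foldl (fun g p => g.modify p.1 [] (fun rs => rs ++ [p.2])) PySem.Dict.empty
  -- for cls in classes: groups.setdefault(cls, [])
  let g2 := classes.foldl (fun g c => g.setdefault c []) g1
  -- {cls: [sum(1 for r in rows if s.issubset(r)), len(rows)] for cls, rows in groups.items()}
  g2.items.map (fun p => (p.1, [((p.2.countP (pvBSubset items)) : Int), (p.2.length : Int)]))

-- ===== PRECONDITION & SPEC =====
-- Pre_ excludes exactly the inputs where A raises IndexError (dataset longer than classes).
def Pre_get_classwise_count (dataset : List (List Int)) (classes : List Int) (items : List Int) : Prop :=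
  dataset.length ≤ classes.length
instance (dataset : List (List Int)) (classes : List Int) (items : List Int) : Decidable (Pre_get_classwise_count dataset classes items) := by unfold Pre_get_classwise_count; infer_instance

def pvWitness_get_classwise_count : List (List Int) × List Int × List Int :=
  ([[1, 2], [3]], [5, 5, 7], [1])

def Spec_get_classwise_count (dataset : List (List Int)) (classes : List Int) (items : List Int) (out : List (Int × List Int)) : Prop := out = get_classwise_count_alt dataset classes items
instance (dataset : List (List Int)) (classes : List Int) (items : List Int) (out : List (Int × List Int)) : Decidable (Spec_get_classwise_count dataset classes items out) := by unfold Spec_get_classwise_count; infer_instance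

-- ===== CLAIM (what is proved, stated in full; the proofs are below) =====
def Claim_equal_get_classwise_count : Prop := ∀ (dataset : List (List Int)) (classes : List Int) (items : List Int), Dom_get_classwise_count dataset classes items → Pre_get_classwise_count dataset classes items → Spec_get_classwise_count dataset classes items (get_classwise_count dataset classes items)


-- ===== LEMMAS AND PROOFS =====

-- counts of found / total rows with class c among the zipped (class, row) pairs
def pvCntF (items : List Int) (ps : List (Int × List Int)) (c : Int) : Int :=
  (ps.countP (fun p => p.1 == c && pvAFound items p.2) : Int)

def pvCntT (ps : List (Int × List Int)) (c : Int) : Int :=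
  (ps.countP (fun p => p.1 == c) : Int)

-- A's loop body on a (class, row) pair
def pvStepPair (items : List Int) (d : PySem.Dict Int (List Int)) (p : Int × List Int) :
    PySem.Dict Int (List Int) :=
  let d1 := if pvAFound items p.2 then d.modify p.1 [0, 0] pvABump0 else d
  d1.modify p.1 [0, 0] pvABump1

theorem pvALoop_eq_foldl (items : List Int) :
    ∀ (ds : List (List Int)) (classes : List Int) (i : Nat) (d : PySem.Dict Int (List Int)),
      i + ds.length ≤ classes.length →
      pvALoop classes items i d ds = ((classes.drop i).zip ds).foldl (pvStepPair items) d := by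
  intro ds
  induction ds with
  | nil => intro classes i d h; simp [pvALoop]
  | cons data rest ih =>
    intro classes i d h
    have hi : i < classes.length := by simp at h; omega
    have hdrop : classes.drop i = classes[i] :: classes.drop (i + 1) :=
      List.drop_eq_getElem_cons hi
    have hget : PySem.List.pyGet? classes (i : Int) = some classes[i] := by
      simp [hi]
    rw [hdrop]
    simp only [List.zip_cons_cons, List.foldl_cons, pvALoop]
    rw [ih classes (i + 1) _ (by simp at h ⊢; omega)]
    congr 1
    simp [pvAStep, hget, pvStepPair]

theorem pvStepPair_eq (items : List Int) (d : PySem.Dict Int (List Int)) (p : Int × List Int)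
    (v : List Int) (hv : d.getD p.1 [0, 0] = v) (hlen : 2 ≤ v.length) :
    pvStepPair items d p
      = d.insert p.1 ((v.set 0 (v.getD 0 0 + (if pvAFound items p.2 then 1 else 0))).set 1 (v.getD 1 0 + 1)) := by
  obtain ⟨a, b, t, rfl⟩ : ∃ a b t, v = a :: b :: t := by
    match v, hlen with | a :: b :: t, _ => exact ⟨a, b, t, rfl⟩
  by_cases hf : pvAFound items p.2
  · simp [pvStepPair, hf, PySem.Dict.modify, hv, pvABump0, pvABump1,
      PySem.Dict.getD_insert_self, PySem.Dict.insert_insert_self, List.set]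
  · simp [pvStepPair, hf, PySem.Dict.modify, hv, pvABump1, List.set]

theorem pvA_fold_items (items : List Int) :
    ∀ (ps : List (Int × List Int)) (ks : List Int) (f t : Int → Int),
      ks.Nodup → (∀ p ∈ ps, p.1 ∈ ks) →
      (ps.foldl (pvStepPair items) ⟨ks.map (fun c => (c, [f c, t c]))⟩).items
        = ks.map (fun c => (c, [f c + pvCntF items ps c, t c + pvCntT ps c])) := by
  intro ps
  induction ps with
  | nil =>
    intro ks f t hnd hmem
    simp [pvCntF, pvCntT]
  | cons p rest ih =>
    intro ks f t hnd hmem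
    have hp1 : p.1 ∈ ks := hmem p (by simp)
    have hkeys : (PySem.Dict.mk (ks.map (fun c => (c, [f c, t c]))) : PySem.Dict Int (List Int)).keys = ks := by
      simp [PySem.Dict.keys, Function.comp_def]
    have hndk : (PySem.Dict.mk (ks.map (fun c => (c, [f c, t c]))) : PySem.Dict Int (List Int)).keys.Nodup := by
      rw [hkeys]; exact hnd
    have hmemit : (p.1, [f p.1, t p.1]) ∈ (PySem.Dict.mk (ks.map (fun c => (c, [f c, t c]))) : PySem.Dict Int (List Int)).items :=
      List.mem_map.mpr ⟨p.1, hp1, rfl⟩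
    have hgetD : (PySem.Dict.mk (ks.map (fun c => (c, [f c, t c]))) : PySem.Dict Int (List Int)).getD p.1 [0, 0] = [f p.1, t p.1] :=
      PySem.Dict.getD_of_mem_items _ hmemit hndk [0, 0]
    set δ : Int := if pvAFound items p.2 then 1 else 0 with hδ
    have hstep : pvStepPair items ⟨ks.map (fun c => (c, [f c, t c]))⟩ p
        = PySem.Dict.mk (ks.map (fun c => (c, [(fun c => if c = p.1 then f c + δ else f c) c,
            (fun c => if c = p.1 then t c + 1 else t c) c]))) := by
      rw [pvStepPair_eq items _ p _ hgetD (by simp)]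
      apply PySem.Dict.ext
      rw [PySem.Dict.items_insert_of_contains _ _
        (by rw [PySem.Dict.contains_iff_mem_keys, hkeys]; exact hp1)]
      simp only [List.map_map]
      apply List.map_congr_left
      intro c _
      by_cases hc : c = p.1 <;> simp [hc, List.set, ← hδ]
    rw [List.foldl_cons, hstep, ih ks _ _ hnd (fun q hq => hmem q (by simp [hq]))]
    apply List.map_congr_left
    intro c _
    have hcntF : pvCntF items (p :: rest) c = pvCntF items rest c + (if p.1 = c then δ else 0) := by
      simp only [pvCntF, List.countP_cons, hδ]
      by_cases hc : p.1 = c <;> by_cases hf : pvAFound items p.2 <;> simp [hc, hf]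
    have hcntT : pvCntT (p :: rest) c = pvCntT rest c + (if p.1 = c then 1 else 0) := by
      simp only [pvCntT, List.countP_cons]
      by_cases hc : p.1 = c <;> simp [hc]
    by_cases hc : c = p.1
    · subst hc; simp [hcntF, hcntT]; constructor <;> ring
    · simp [hcntF, hcntT, hc, Ne.symm hc]

-- B-side lemmas

theorem pvFound_iff (items row : List Int) : pvAFound items row = true ↔ ∀ x ∈ items, x ∈ row := by
  induction items with
  | nil => simp [pvAFound]
  | cons it rest ih =>
    by_cases h : it ∈ row <;> simp [pvAFound, h, ih]

theorem pvBSubset_eq_pvAFound (items row : List Int) : pvBSubset items row = pvAFound items row := by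
  rcases hb : pvAFound items row with _ | _
  · rw [← Bool.not_eq_true] at hb ⊢
    intro hs; apply hb
    rw [pvFound_iff]
    intro x hx
    have := List.all_eq_true.mp hs x ((PySem.Set.mem_ofList items x).mpr hx)
    exact List.contains_iff_mem.mp this
  · apply List.all_eq_true.mpr
    intro x hx
    exact List.contains_iff_mem.mpr ((pvFound_iff items row).mp hb x ((PySem.Set.mem_ofList items x).mp hx))

theorem pvSetdefault_fold_getD (cs : List Int) :
    ∀ (g : PySem.Dict Int (List (List Int))) (c : Int),
      (cs.foldl (fun g c => g.setdefault c []) g).getD c [] = g.getD c [] := by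
  induction cs with
  | nil => intro g c; rfl
  | cons c' rest ih =>
    intro g c
    rw [List.foldl_cons, ih]
    by_cases hc : c = c'
    · subst hc; rw [PySem.Dict.getD_setdefault_self]
    · rw [PySem.Dict.getD_eq_get?_getD, PySem.Dict.get?_setdefault_of_ne _ _ hc,
        ← PySem.Dict.getD_eq_get?_getD]

theorem pvSetdefault_fold_keys (cs : List Int) :
    ∀ (g : PySem.Dict Int (List (List Int))),
      (cs.foldl (fun g c => g.setdefault c []) g).keys = PySem.Set.update g.keys cs := by
  induction cs with
  | nil => intro g; rfl
  | cons c' rest ih =>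
    intro g
    rw [List.foldl_cons, ih]
    have h2 : PySem.Set.update g.keys (c' :: rest) = PySem.Set.update (PySem.Set.add g.keys c') rest := rfl
    rw [h2]
    congr 1
    by_cases hc : c' ∈ g.keys <;>
      simp [PySem.Dict.keys_setdefault, PySem.Set.add, PySem.Set.contains,
        PySem.Dict.contains_iff_mem_keys, hc]

theorem pvSet_update_of_subset (xs : List Int) :
    ∀ (s : PySem.Set Int), (∀ x ∈ xs, x ∈ s) → PySem.Set.update s xs = s := by
  induction xs with
  | nil => intro s _; rfl
  | cons x rest ih =>
    intro s h
    have h1 : PySem.Set.update s (x :: rest) = PySem.Set.update (PySem.Set.add s x) rest := rfl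
    have h2 : PySem.Set.add s x = s := by
      simp [PySem.Set.add, PySem.Set.contains, h x (by simp)]
    rw [h1, h2]
    exact ih s (fun y hy => h y (by simp [hy]))

theorem pvSet_update_take (l : List Int) (n : Nat) :
    PySem.Set.update (PySem.Set.ofList (l.take n)) l = PySem.Set.ofList l := by
  have hr : PySem.Set.ofList l = PySem.Set.update (PySem.Set.ofList (l.take n)) (l.drop n) := by
    rw [PySem.Set.ofList_eq_foldl, PySem.Set.ofList_eq_foldl, PySem.Set.update,
      ← List.foldl_append, List.take_append_drop]
  have hl : PySem.Set.update (PySem.Set.ofList (l.take n)) l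
      = PySem.Set.update (PySem.Set.update (PySem.Set.ofList (l.take n)) (l.take n)) (l.drop n) := by
    rw [PySem.Set.update, PySem.Set.update, PySem.Set.update, ← List.foldl_append,
      List.take_append_drop]
  rw [hl, hr, pvSet_update_of_subset _ _ (fun x hx => (PySem.Set.mem_ofList _ x).mpr hx)]

theorem pvMap_fst_zip (l1 : List Int) (l2 : List (List Int)) :
    (l1.zip l2).map Prod.fst = l1.take l2.length := by
  induction l1 generalizing l2 with
  | nil => simp
  | cons a t ih =>
    cases l2 with
    | nil => simp
    | cons b s => simp [ih]

def pvRows (ps : List (Int × List Int)) (c : Int) : List (List Int) :=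
  (ps.filter (fun p => p.1 == c)).map (fun x => x.2)

theorem get_classwise_count_spec : Claim_equal_get_classwise_count := by
  intro ds cs it _ hpre
  unfold Pre_get_classwise_count at hpre
  unfold Spec_get_classwise_count
  simp only [get_classwise_count, get_classwise_count_alt]
  -- A side: initial dict
  have hd0 : ((PySem.Set.ofList cs).foldl (fun d k => d.insert k ([0, 0] : List Int)) PySem.Dict.empty)
      = (⟨(PySem.Set.ofList cs).map (fun c => (c, [0, 0]))⟩ : PySem.Dict Int (List Int)) := by
    apply PySem.Dict.ext
    rw [PySem.Dict.items_foldl_insert_fresh (PySem.Set.ofList cs) (fun a => a)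
      (fun _ => ([0, 0] : List Int)) PySem.Dict.empty (by intro a _; simp [PySem.Dict.contains_empty])
      (by simp only [List.map_id_fun', id]; exact PySem.Set.nodup_ofList cs)]
    simp [PySem.Dict.empty]
  have hmem : ∀ p ∈ cs.zip ds, p.1 ∈ PySem.Set.ofList cs := by
    intro p hp
    exact (PySem.Set.mem_ofList cs p.1).mpr (List.of_mem_zip (a := p.1) (b := p.2) (by simpa using hp)).1
  have hA := pvA_fold_items it (cs.zip ds) (PySem.Set.ofList cs) (fun _ => 0) (fun _ => 0)
    (PySem.Set.nodup_ofList cs) hmem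
  rw [pvALoop_eq_foldl it ds cs 0 _ (by simpa using hpre), List.drop_zero, hd0, hA]
  -- B side
  have hgetD1 : ∀ c : Int,
      ((cs.zip ds).foldl (fun g p => g.modify p.1 [] (fun rs => rs ++ [p.2])) PySem.Dict.empty).getD c []
        = pvRows (cs.zip ds) c := by
    intro c
    rw [PySem.Dict.getD_foldl_modify_append, PySem.Dict.getD_empty]
    rfl
  have hkeys1 : ((cs.zip ds).foldl (fun g p => g.modify p.1 [] (fun rs => rs ++ [p.2])) PySem.Dict.empty).keys
      = PySem.Set.ofList (cs.take ds.length) := by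
    rw [PySem.Dict.keys_foldl_modify_key (cs.zip ds) Prod.fst [] (fun _ p => fun rs => rs ++ [p.2]) PySem.Dict.empty,
      PySem.Dict.keys_empty, pvMap_fst_zip, PySem.Set.update, ← PySem.Set.ofList_eq_foldl]
  have hkeys2 : (cs.foldl (fun g c => g.setdefault c [])
      ((cs.zip ds).foldl (fun g p => g.modify p.1 [] (fun rs => rs ++ [p.2])) PySem.Dict.empty)).keys
      = PySem.Set.ofList cs := by
    rw [pvSetdefault_fold_keys, hkeys1, pvSet_update_take]
  have hgetD2 : ∀ c : Int, (cs.foldl (fun g c => g.setdefault c [])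
      ((cs.zip ds).foldl (fun g p => g.modify p.1 [] (fun rs => rs ++ [p.2])) PySem.Dict.empty)).getD c []
      = pvRows (cs.zip ds) c := by
    intro c; rw [pvSetdefault_fold_getD, hgetD1]
  rw [PySem.Dict.items_eq_map_keys _ (by rw [hkeys2]; exact PySem.Set.nodup_ofList cs) [], hkeys2]
  rw [List.map_map]
  apply List.map_congr_left
  intro c _
  simp only [Function.comp_def, hgetD2]
  have hcount : ((pvRows (cs.zip ds) c).countP (pvBSubset it) : Int) = pvCntF it (cs.zip ds) c := by
    unfold pvRows pvCntF
    rw [List.countP_map, List.countP_filter]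
    congr 1
    apply List.countP_congr
    intro p _
    simp [pvBSubset_eq_pvAFound, Bool.and_comm]
  have hlen : ((pvRows (cs.zip ds) c).length : Int) = pvCntT (cs.zip ds) c := by
    unfold pvRows pvCntT
    rw [List.length_map, ← List.countP_eq_length_filter]
  rw [hcount, hlen]
  simp

-- ===== VERDICT (by name: the statement is the Claim_ definition above) =====
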